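-- pv_equiv track=rewrite | github.com/Adriceka/Codewars | ejercicios/Only Duplicates.py | only_duplicates
-- ===== SOURCE A (Python) =====
-- def only_duplicates(st):
--     contador = {}
--     for letra_duplicada in st:  #"st" seria el nombre "string" abreviado
--         if letra_duplicada in contador:
--             contador[letra_duplicada] += 1
--         else:
--             contador[letra_duplicada] = 1
--
--     resultado = ""
--     for letra_duplicada in st:
--         if contador[letra_duplicada] > 1:
--             resultado += letra_duplicada
--
--     return resultado
-- ===== SOURCE B (Python) =====
-- def only_duplicates(st):
--     s = sorted(st)
--     dups = {a for a, b in zip(s, s[1:]) if a == b}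
--     return ''.join(c for c in st if c in dups)
-- ===== Notes on version B (the rewrite author's own statement) =====
-- stated objective: alternative
-- what changed: Replaces the frequency dictionary with a sort-then-adjacent-scan: sorting brings equal characters together, so the duplicated characters are exactly those equal to their sorted neighbour; the input is then filtered by membership in that set.
import Mathlib
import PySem

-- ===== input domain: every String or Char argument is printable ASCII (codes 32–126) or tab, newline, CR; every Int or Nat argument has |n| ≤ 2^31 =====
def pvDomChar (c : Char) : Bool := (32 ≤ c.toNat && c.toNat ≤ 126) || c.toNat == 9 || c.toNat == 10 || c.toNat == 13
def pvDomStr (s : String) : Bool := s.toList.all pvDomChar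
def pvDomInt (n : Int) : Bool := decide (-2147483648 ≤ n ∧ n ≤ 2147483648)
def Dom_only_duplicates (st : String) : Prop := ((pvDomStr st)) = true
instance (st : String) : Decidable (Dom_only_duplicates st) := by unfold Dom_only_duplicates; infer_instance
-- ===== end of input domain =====

-- B replaces A's frequency dictionary with a sort-then-adjacent-scan: after sorting, a character is
-- duplicated iff it equals its sorted neighbour; an alternative algorithm, not faster.
-- ===== PORT A =====
def only_duplicates (st : String) : String :=
  -- contador[letra] += 1 / = 1 : both branches are one overwrite-in-place insert with getD
  let contador : PySem.Dict Char Int :=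
    st.toList.foldl (fun d c => d.insert c (d.getD c 0 + 1)) PySem.Dict.empty
  String.ofList (st.toList.foldl (fun r c => if contador.getD c 0 > 1 then r ++ [c] else r) [])

-- ===== PORT B =====
def only_duplicates_alt (st : String) : String :=
  let s := PySem.List.sorted st.toList (fun x => x) false
  -- {a for a, b in zip(s, s[1:]) if a == b}; the set is consumed only by membership below
  let dups : PySem.Set Char :=
    PySem.Set.ofList ((s.zip (PySem.List.slice s (some 1) none)).filterMap
      (fun p => if p.1 = p.2 then some p.1 else none))
  String.ofList (st.toList.filter (fun c => PySem.Set.contains dups c))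

-- ===== PRECONDITION & SPEC =====
def Spec_only_duplicates (st : String) (out : String) : Prop := out = only_duplicates_alt st
instance (st : String) (out : String) : Decidable (Spec_only_duplicates st out) := by unfold Spec_only_duplicates; infer_instance

-- ===== CLAIM (what is proved, stated in full; the proofs are below) =====
def Claim_equal_only_duplicates : Prop := ∀ (st : String), Dom_only_duplicates st → Spec_only_duplicates st (only_duplicates st)

-- ===== LEMMAS AND PROOFS =====

-- membership in B's filterMap of adjacent pairs is membership of the pair (c, c)
lemma mem_filterMap_eqpair (c : Char) (xs : List (Char × Char)) :
    c ∈ xs.filterMap (fun p => if p.1 = p.2 then some p.1 else none) ↔ (c, c) ∈ xs := by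
  simp only [List.mem_filterMap]
  constructor
  · rintro ⟨⟨x, y⟩, hxy, hfe⟩
    by_cases h' : x = y
    · subst h'
      simp only [if_true, Option.some.injEq] at hfe
      subst hfe; exact hxy
    · simp [h'] at hfe
  · intro h; exact ⟨(c, c), h, by simp⟩

-- in a ≤-sorted list, some adjacent pair is (c, c) iff c occurs at least twice
lemma adj_mem {l : List Char} (h : l.Pairwise (· ≤ ·)) (c : Char) :
    (c, c) ∈ l.zip l.tail ↔ 2 ≤ l.count c := by
  induction l with
  | nil => simp
  | cons a t ih =>
    cases t with
    | nil =>
      simp only [List.tail_cons, List.zip_nil_right, List.not_mem_nil, false_iff, not_le]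
      by_cases h' : a = c <;> simp [h']
    | cons b t =>
      have hbt := h.tail
      have hab : a ≤ b := (List.pairwise_cons.mp h).1 b List.mem_cons_self
      have hx : ∀ x ∈ t, b ≤ x := (List.pairwise_cons.mp hbt).1
      have hrec := ih hbt
      simp only [List.tail_cons] at hrec ⊢
      rw [List.zip_cons_cons, List.mem_cons, Prod.mk.injEq]
      have hcount : List.count c (a :: b :: t) = List.count c (b :: t) + (if a = c then 1 else 0) := by
        by_cases h' : a = c <;> simp [List.count_cons, h']
      constructor
      · rintro (⟨h1, h2⟩ | hm)
        · rw [hcount, if_pos h1.symm]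
          have : 1 ≤ List.count c (b :: t) :=
            List.count_pos_iff.mpr (h2 ▸ List.mem_cons_self)
          omega
        · have := hrec.mp hm; rw [hcount]; omega
      · intro hc2
        by_cases hac : a = c
        · have h1 : 1 ≤ List.count c (b :: t) := by rw [hcount, if_pos hac] at hc2; omega
          have hmem : c ∈ b :: t := List.count_pos_iff.mp (by omega)
          by_cases hbc : b = c
          · exact Or.inl ⟨hac.symm, hbc.symm⟩
          · have hct : c ∈ t := by
              rcases List.mem_cons.mp hmem with h' | h'
              · exact absurd h'.symm hbc
              · exact h'
            have hba : b ≤ a := hac ▸ hx c hct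
            exact absurd ((le_antisymm hab hba).symm.trans hac) hbc
        · have h2 : 2 ≤ List.count c (b :: t) := by rw [hcount, if_neg hac] at hc2; omega
          exact Or.inr (hrec.mpr h2)

-- ===== VERDICT (by name: the statement is the Claim_ definition above) =====
theorem only_duplicates_spec : Claim_equal_only_duplicates := by
  intro st _
  unfold Spec_only_duplicates only_duplicates only_duplicates_alt
  simp only [PySem.List.foldl_append_ite_eq_filter, List.nil_append, PySem.List.slice_from_one]
  congr 1
  apply List.filter_congr
  intro c hc
  rw [PySem.Dict.getD_foldl_insert_add_one]
  have hpw : (PySem.List.sorted st.toList (fun x => x) false).Pairwise (· ≤ ·) := by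
    simpa using PySem.List.sorted_pairwise st.toList (fun x => x)
  have hkey : (c, c) ∈ (PySem.List.sorted st.toList (fun x => x) false).zip
      (PySem.List.sorted st.toList (fun x => x) false).tail ↔ 2 ≤ st.toList.count c := by
    rw [adj_mem hpw c, (PySem.List.sorted_perm st.toList (fun x => x) false).count_eq c]
  rw [Bool.eq_iff_iff]
  simp only [PySem.Set.contains, List.contains_iff_mem, PySem.Set.mem_ofList,
    mem_filterMap_eqpair, hkey, decide_eq_true_eq, PySem.Dict.getD_empty]
  omega
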